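-- pv_equiv track=rewrite | github.com/WilliamHirst/MasterThesis | Codebase/Scripts/SUSYPheno/bin/mytestarg_lib.py | insertZero
-- ===== SOURCE A (Python) =====
-- def insertZero(s1,wid1,wid2):
--     #(only first entry is replaced, more rigorous implementation would test on occurences)
--     # insertZero("aa_p4",1,2) -> "aa_p04"
--     # insertZero("aa_p4",1,3) -> "aa_p004"
--     # insertZero("aa_44003_3bc",1,2) -> "aa_44003_03bc"
--
--     n=len(s1)
--     i=0
--     while(i<n-wid1+1):
--         # Find a digit
--         if(s1[i].isdigit()):
--             # Check how many digits follow this one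
--             j=i+1
--             while(j<n and s1[j].isdigit()): j+=1
--
--             #print s1[i:j]
--             # Test if acceptable region (will allow for more general usage)
--             if(j-i>=wid1 and j-i<=wid2):
--                 #then replace
--                 s2=s1[0:i]+s1[i:j].zfill(wid2)+s1[j:n]
--                 return s2
--             else:
--                 i=j
--                 continue
--         i+=1
--
--     #if arrive here, then no digit within [wid1,wid2] is found
--     return s1
-- ===== SOURCE B (Python) =====
-- def insertZero(s1, wid1, wid2):
--     # Tokenize s1 into maximal runs of equal digit-ness, then scan the runs:
--     # the first digit run whose length lies in [wid1, wid2] is zero-padded to wid2.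
--     runs = []
--     for ch in s1:
--         if runs and runs[-1][0].isdigit() == ch.isdigit():
--             runs[-1] += ch
--         else:
--             runs.append(ch)
--     pos = 0
--     for run in runs:
--         L = len(run)
--         if run[0].isdigit() and wid1 <= L <= wid2:
--             return s1[:pos] + run.zfill(wid2) + s1[pos + L:]
--         pos += L
--     return s1
-- ===== Notes on version B (the rewrite author's own statement) =====
-- stated objective: alternative
-- what changed: B first tokenizes the string into maximal digit/non-digit runs and then scans the run list with a running offset, instead of A's fused two-pointer index scan with an inner digit-counting while loop.
import Mathlib
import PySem

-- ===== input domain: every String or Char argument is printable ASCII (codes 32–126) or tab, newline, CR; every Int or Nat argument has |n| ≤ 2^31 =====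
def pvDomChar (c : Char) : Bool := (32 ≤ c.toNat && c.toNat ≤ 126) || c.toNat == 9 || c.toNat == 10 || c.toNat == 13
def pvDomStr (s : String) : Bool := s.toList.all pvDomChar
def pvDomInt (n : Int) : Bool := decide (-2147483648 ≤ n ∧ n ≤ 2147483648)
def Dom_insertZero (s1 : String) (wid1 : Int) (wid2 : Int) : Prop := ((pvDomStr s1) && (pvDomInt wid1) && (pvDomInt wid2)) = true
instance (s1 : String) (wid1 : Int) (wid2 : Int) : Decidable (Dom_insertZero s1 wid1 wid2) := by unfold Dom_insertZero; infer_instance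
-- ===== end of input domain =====

-- B re-implements A by tokenizing the string into maximal digit/non-digit runs and
-- scanning the runs (a different decomposition of the same task, not faster).

-- ===== PORT A =====
-- inner while loop: `j=i+1; while(j<n and s1[j].isdigit()): j+=1` (the j<n guard makes s1[j] safe)
def innerA (s : List Char) (j : Nat) : Nat :=
  if h : j < s.length then
    if PySem.Chars.isdigit s[j] then innerA s (j + 1) else j
  else j
termination_by s.length - j
decreasing_by omega

-- needed by outerA's termination proof (the outer loop resumes at i=j > i)
theorem innerA_ge (s : List Char) (j : Nat) : j ≤ innerA s j := by
  unfold innerA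
  split
  · split
    · exact Nat.le_trans (Nat.le_succ j) (innerA_ge s (j + 1))
    · exact Nat.le_refl j
  · exact Nat.le_refl j
termination_by s.length - j
decreasing_by omega

-- outer while loop of A; `none` = the IndexError Python raises at s1[i] with i = n
def outerA (s : List Char) (wid1 wid2 : Int) (i : Nat) : Option (List Char) :=
  if (i : Int) < (s.length : Int) - wid1 + 1 then
    match hg : PySem.List.pyGet? s (i : Int) with
    | none => none
    | some c =>
      if PySem.Chars.isdigit c then
        let j := innerA s (i + 1)
        if wid1 ≤ (j : Int) - (i : Int) ∧ (j : Int) - (i : Int) ≤ wid2 then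
          some (PySem.List.slice s (some 0) (some (i : Int)) ++
                PySem.Chars.zfill (PySem.List.slice s (some (i : Int)) (some (j : Int))) wid2 ++
                PySem.List.slice s (some (j : Int)) (some (s.length : Int)))
        else outerA s wid1 wid2 j
      else outerA s wid1 wid2 (i + 1)
  else some s
termination_by s.length - i
decreasing_by
  all_goals
    rw [PySem.List.pyGet?_natCast] at hg
    have h1 : i < s.length := (List.getElem?_eq_some_iff.mp hg).1
  · have h2 : i + 1 ≤ innerA s (i + 1) := innerA_ge s (i + 1)
    omega
  · omega

def insertZero (s1 : String) (wid1 : Int) (wid2 : Int) : String :=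
  match outerA s1.toList wid1 wid2 0 with
  | some l => String.ofList l
  | none => s1    -- unreachable under Pre_ (Python raises IndexError there)

-- ===== PORT B =====
-- body of Source B's first loop: extend the last run or start a new one
-- (runs are never empty, so `runs[-1][0]` is `headD` with an arbitrary default)
def stepB (runs : List (List Char)) (ch : Char) : List (List Char) :=
  match runs.getLast? with
  | some r =>
    if PySem.Chars.isdigit (r.headD ' ') == PySem.Chars.isdigit ch then
      runs.dropLast ++ [r ++ [ch]]
    else runs ++ [[ch]]
  | none => runs ++ [[ch]]

def buildRuns (s : List Char) : List (List Char) := s.foldl stepB []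

-- Source B's second loop: scan the runs with a running offset
def scanB (full : List Char) (wid1 wid2 : Int) : List (List Char) → Nat → List Char
  | [], _ => full
  | run :: rest, pos =>
    if PySem.Chars.isdigit (run.headD ' ') ∧ wid1 ≤ (run.length : Int) ∧ (run.length : Int) ≤ wid2 then
      PySem.List.slice full none (some (pos : Int)) ++
      PySem.Chars.zfill run wid2 ++
      PySem.List.slice full (some ((pos : Int) + (run.length : Int))) none
    else scanB full wid1 wid2 rest (pos + run.length)

def insertZero_alt (s1 : String) (wid1 : Int) (wid2 : Int) : String :=
  String.ofList (scanB s1.toList wid1 wid2 (buildRuns s1.toList) 0)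

-- ===== PRECONDITION & SPEC =====
-- the maximal runs of equal digit-ness of a list (input-shape description used by Pre_)
def pvRuns : List Char → List (List Char)
  | [] => []
  | c :: t =>
    match pvRuns t with
    | [] => [[c]]
    | r :: rs =>
      if PySem.Chars.isdigit (r.headD ' ') == PySem.Chars.isdigit c then (c :: r) :: rs
      else [c] :: r :: rs

-- Pre_ excludes exactly the inputs where A raises IndexError: when wid1 ≤ 0 the loop bound
-- n-wid1+1 exceeds n, so unless some maximal digit run of length ≤ wid2 triggers a return
-- first, A reads s1[n] and raises.
def Pre_insertZero (s1 : String) (wid1 : Int) (wid2 : Int) : Prop :=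
  1 ≤ wid1 ∨ ∃ r ∈ pvRuns s1.toList, r.all PySem.Chars.isdigit = true ∧ (r.length : Int) ≤ wid2
instance (s1 : String) (wid1 : Int) (wid2 : Int) : Decidable (Pre_insertZero s1 wid1 wid2) := by
  unfold Pre_insertZero; infer_instance

def pvWitness_insertZero : String × Int × Int := ("aa_44003_3bc", 1, 2)

def Spec_insertZero (s1 : String) (wid1 : Int) (wid2 : Int) (out : String) : Prop :=
  out = insertZero_alt s1 wid1 wid2
instance (s1 : String) (wid1 : Int) (wid2 : Int) (out : String) : Decidable (Spec_insertZero s1 wid1 wid2 out) := by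
  unfold Spec_insertZero; infer_instance

-- ===== CLAIM (what is proved, stated in full; the proofs are below) =====
def Claim_equal_insertZero : Prop := ∀ (s1 : String) (wid1 : Int) (wid2 : Int), Dom_insertZero s1 wid1 wid2 → Pre_insertZero s1 wid1 wid2 → Spec_insertZero s1 wid1 wid2 (insertZero s1 wid1 wid2)
-- ===== LEMMAS AND PROOFS =====

-- pvRuns produces the maximal runs: takeWhile/dropWhile characterisation
theorem pvRuns_cons (c : Char) (t : List Char) :
    pvRuns (c :: t) =
      (c :: t.takeWhile (fun x => PySem.Chars.isdigit x == PySem.Chars.isdigit c)) ::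
        pvRuns (t.dropWhile (fun x => PySem.Chars.isdigit x == PySem.Chars.isdigit c)) := by
  induction t generalizing c with
  | nil => simp [pvRuns]
  | cons d t ih =>
    by_cases hdc : PySem.Chars.isdigit d = PySem.Chars.isdigit c
    · conv_lhs => rw [pvRuns, ih d]
      simp [hdc]
    · have hdc' : (PySem.Chars.isdigit d == PySem.Chars.isdigit c) = false := by
        simp [hdc]
      conv_lhs => rw [pvRuns, ih d]
      simp [hdc']
      exact (ih d).symm

-- basic facts about runs: nonempty, bounded length, uniform digit-ness
theorem pvRuns_sound (s : List Char) (r : List Char) (hr : r ∈ pvRuns s) :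
    r ≠ [] ∧ r.length ≤ s.length ∧ ∀ c ∈ r, PySem.Chars.isdigit c = PySem.Chars.isdigit (r.headD ' ') := by
  match s with
  | [] => simp [pvRuns] at hr
  | c :: t =>
    rw [pvRuns_cons] at hr
    rcases List.mem_cons.mp hr with h | h
    · subst h
      refine ⟨by simp, ?_, ?_⟩
      · have := (List.takeWhile_sublist (l := t) (fun x => PySem.Chars.isdigit x == PySem.Chars.isdigit c)).length_le
        simp
        omega
      · intro x hx
        rcases List.mem_cons.mp hx with h | h
        · simp [h]
        · have := List.mem_takeWhile_imp h
          simp at this ⊢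
          exact this
    · have hlen := (List.dropWhile_sublist (l := t) (fun x => PySem.Chars.isdigit x == PySem.Chars.isdigit c)).length_le
      have ih := pvRuns_sound (t.dropWhile (fun x => PySem.Chars.isdigit x == PySem.Chars.isdigit c)) r h
      refine ⟨ih.1, by simp; omega, ih.2.2⟩
termination_by s.length
decreasing_by
  have := (List.dropWhile_sublist (l := t) (fun x => PySem.Chars.isdigit x == PySem.Chars.isdigit c)).length_le
  simp; omega

-- the inner while loop counts the digits following position k
theorem innerA_eq (s : List Char) (k : Nat) :
    innerA s k = k + ((s.drop k).takeWhile PySem.Chars.isdigit).length := by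
  unfold innerA
  split
  · rename_i h
    have hd : s.drop k = s[k] :: s.drop (k + 1) := List.drop_eq_getElem_cons h
    split
    · rename_i hdig
      rw [innerA_eq s (k + 1), hd, List.takeWhile_cons_of_pos (by simpa using hdig)]
      simp
      omega
    · rename_i hdig
      rw [hd, List.takeWhile_cons_of_neg (by simpa using hdig)]
      simp
  · rename_i h
    have : s.drop k = [] := by
      rw [List.drop_eq_nil_iff]
      omega
    simp [this]
termination_by s.length - k

theorem innerA_le (s : List Char) (k : Nat) (h : k ≤ s.length) : innerA s k ≤ s.length := by
  have := innerA_eq s k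
  have h2 := (List.takeWhile_sublist (l := s.drop k) PySem.Chars.isdigit).length_le
  simp [List.length_drop] at h2
  omega

-- if no run qualifies, B's scan returns the string unchanged
theorem scanB_eq_full (full : List Char) (w1 w2 : Int) (rs : List (List Char)) (pos : Nat)
    (h : ∀ r ∈ rs, ¬(PySem.Chars.isdigit (r.headD ' ') = true ∧ w1 ≤ (r.length : Int) ∧ (r.length : Int) ≤ w2)) :
    scanB full w1 w2 rs pos = full := by
  induction rs generalizing pos with
  | nil => rfl
  | cons r rest ih =>
    rw [scanB]
    rw [if_neg (h r (List.mem_cons_self ..))]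
    exact ih _ (fun r hr => h r (List.mem_cons_of_mem _ hr))

-- B's run builder computes pvRuns
theorem foldl_stepB (s : List Char) (rs : List (List Char)) (r : List Char) (hne : r ≠ []) :
    List.foldl stepB (rs ++ [r]) s =
      rs ++ (r ++ s.takeWhile (fun x => PySem.Chars.isdigit x == PySem.Chars.isdigit (r.headD ' '))) ::
        pvRuns (s.dropWhile (fun x => PySem.Chars.isdigit x == PySem.Chars.isdigit (r.headD ' '))) := by
  induction s generalizing rs r with
  | nil => simp [pvRuns]
  | cons c s' ih =>
    rw [List.foldl_cons]
    by_cases hc : (PySem.Chars.isdigit (r.headD ' ') == PySem.Chars.isdigit c) = true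
    · have hce : PySem.Chars.isdigit (r.headD ' ') = PySem.Chars.isdigit c := beq_iff_eq.mp hc
      have hceG : PySem.Chars.isdigit (r.head?.getD ' ') = PySem.Chars.isdigit c := by
        rw [← List.headD_eq_head?]; exact hce
      have hs : stepB (rs ++ [r]) c = rs ++ [r ++ [c]] := by
        simp [stepB, List.dropLast_concat, hceG]
      have hh : (r ++ [c]).headD ' ' = r.headD ' ' := by
        cases r with
        | nil => exact absurd rfl hne
        | cons a as => rfl
      have hpc : ((PySem.Chars.isdigit c == PySem.Chars.isdigit (r.headD ' ')) = true) := by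
        simp
        exact hceG.symm
      rw [hs, ih rs (r ++ [c]) (by simp), hh,
        List.takeWhile_cons_of_pos (p := fun x => PySem.Chars.isdigit x == PySem.Chars.isdigit (r.headD ' ')) (a := c) (l := s') hpc,
        List.dropWhile_cons_of_pos (p := fun x => PySem.Chars.isdigit x == PySem.Chars.isdigit (r.headD ' ')) (a := c) (l := s') hpc]
      simp
    · have hne2G : PySem.Chars.isdigit (r.head?.getD ' ') ≠ PySem.Chars.isdigit c := by
        rw [← List.headD_eq_head?]
        simpa using hc
      have hs : stepB (rs ++ [r]) c = (rs ++ [r]) ++ [[c]] := by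
        simp [stepB]
        exact hne2G
      have hpc : ¬((PySem.Chars.isdigit c == PySem.Chars.isdigit (r.headD ' ')) = true) := by
        simp
        exact fun h => hne2G h.symm
      rw [hs, ih (rs ++ [r]) [c] (by simp),
        List.takeWhile_cons_of_neg (p := fun x => PySem.Chars.isdigit x == PySem.Chars.isdigit (r.headD ' ')) (a := c) (l := s') hpc,
        List.dropWhile_cons_of_neg (p := fun x => PySem.Chars.isdigit x == PySem.Chars.isdigit (r.headD ' ')) (a := c) (l := s') hpc,
        pvRuns_cons]
      simp

theorem buildRuns_eq (s : List Char) : buildRuns s = pvRuns s := by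
  cases s with
  | nil => rfl
  | cons c t =>
    show List.foldl stepB [] (c :: t) = pvRuns (c :: t)
    rw [List.foldl_cons]
    have h0 : stepB [] c = [] ++ [[c]] := by simp [stepB]
    rw [h0, foldl_stepB t [] [c] (by simp), pvRuns_cons]
    simp

-- take/drop by the takeWhile length recover takeWhile/dropWhile
theorem take_lenTakeWhile (p : Char → Bool) (l : List Char) :
    l.take (l.takeWhile p).length = l.takeWhile p := by
  induction l with
  | nil => rfl
  | cons a l ih =>
    by_cases h : p a = true
    · rw [List.takeWhile_cons_of_pos h, List.length_cons, List.take_succ_cons, ih]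
    · rw [List.takeWhile_cons_of_neg (by simp [h]), List.length_nil, List.take_zero]

theorem drop_lenTakeWhile (p : Char → Bool) (l : List Char) :
    l.drop (l.takeWhile p).length = l.dropWhile p := by
  induction l with
  | nil => rfl
  | cons a l ih =>
    by_cases h : p a = true
    · rw [List.takeWhile_cons_of_pos h, List.dropWhile_cons_of_pos h, List.length_cons,
        List.drop_succ_cons, ih]
    · rw [List.takeWhile_cons_of_neg (by simp [h]), List.dropWhile_cons_of_neg (by simp [h]),
        List.length_nil, List.drop_zero]

-- runs of the dropWhile-suffix are runs of the whole list
theorem pvRuns_dropWhile_sub (t : List Char) (c : Char) (r : List Char)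
    (hr : r ∈ pvRuns (t.dropWhile (fun x => PySem.Chars.isdigit x == PySem.Chars.isdigit c))) :
    r ∈ pvRuns t := by
  cases t with
  | nil => simpa using hr
  | cons d t' =>
    by_cases hdc : PySem.Chars.isdigit d = PySem.Chars.isdigit c
    · rw [List.dropWhile_cons_of_pos (by simp [hdc])] at hr
      have hfun : (fun x => PySem.Chars.isdigit x == PySem.Chars.isdigit d)
          = (fun x => PySem.Chars.isdigit x == PySem.Chars.isdigit c) := by
        funext x; rw [hdc]
      rw [pvRuns_cons, hfun]
      exact List.mem_cons_of_mem _ hr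
    · rwa [List.dropWhile_cons_of_neg (by simp [hdc])] at hr

-- skipping a uniform non-digit prefix of the suffix does not change B's scan
theorem scanB_skip (full : List Char) (w1 w2 : Int) (t : List Char) (c : Char) (pos : Nat)
    (hc : PySem.Chars.isdigit c = false) :
    scanB full w1 w2 (pvRuns (t.dropWhile (fun x => PySem.Chars.isdigit x == PySem.Chars.isdigit c)))
      (pos + (t.takeWhile (fun x => PySem.Chars.isdigit x == PySem.Chars.isdigit c)).length)
      = scanB full w1 w2 (pvRuns t) pos := by
  cases t with
  | nil => rfl
  | cons d t' =>
    by_cases hdc : PySem.Chars.isdigit d = PySem.Chars.isdigit c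
    · have hfun : (fun x => PySem.Chars.isdigit x == PySem.Chars.isdigit d)
          = (fun x => PySem.Chars.isdigit x == PySem.Chars.isdigit c) := by
        funext x; rw [hdc]
      rw [List.dropWhile_cons_of_pos (by simp [hdc]), List.takeWhile_cons_of_pos (by simp [hdc])]
      conv_rhs => rw [pvRuns_cons, hfun]
      rw [scanB, if_neg (by simp [hdc, hc])]
    · rw [List.dropWhile_cons_of_neg (by simp [hdc]), List.takeWhile_cons_of_neg (by simp [hdc])]
      simp

-- the heart of the proof: A's fused scan agrees with B's run scan from any position i
theorem mainA (full : List Char) (w1 w2 : Int) (i : Nat) (hi : i ≤ full.length)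
    (hQ : 1 ≤ w1 ∨ ∃ r ∈ pvRuns (full.drop i), r.all PySem.Chars.isdigit = true ∧ (r.length : Int) ≤ w2) :
    outerA full w1 w2 i = some (scanB full w1 w2 (pvRuns (full.drop i)) i) := by
  unfold outerA
  split
  · -- loop condition holds
    rename_i hcond
    split
    · -- pyGet? = none: Python would raise; impossible under hQ
      rename_i hg
      exfalso
      rw [PySem.List.pyGet?_natCast] at hg
      have hge : full.length ≤ i := by
        have := List.getElem?_eq_none_iff.mp hg
        omega
      have hieq : i = full.length := Nat.le_antisymm hi hge
      rcases hQ with h | ⟨r, hr, _⟩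
      · rw [hieq] at hcond
        omega
      · rw [hieq, List.drop_length] at hr
        simp [pvRuns] at hr
    · -- pyGet? = some c
      rename_i c hg
      rw [PySem.List.pyGet?_natCast] at hg
      obtain ⟨hilt, hci⟩ := List.getElem?_eq_some_iff.mp hg
      have hd : full.drop i = c :: full.drop (i + 1) := by
        rw [List.drop_eq_getElem_cons hilt, hci]
      by_cases hdig : PySem.Chars.isdigit c = true
      · -- digit run starting at i
        rw [if_pos hdig]
        have hj : innerA full (i + 1) =
            (i + 1) + ((full.drop (i + 1)).takeWhile PySem.Chars.isdigit).length :=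
          innerA_eq full (i + 1)
        have hpfun : (fun x => PySem.Chars.isdigit x == PySem.Chars.isdigit c)
            = PySem.Chars.isdigit := by
          funext x; simp [hdig]
        have hruns : pvRuns (full.drop i) =
            (c :: (full.drop (i + 1)).takeWhile PySem.Chars.isdigit) ::
              pvRuns ((full.drop (i + 1)).dropWhile PySem.Chars.isdigit) := by
          rw [hd, pvRuns_cons, hpfun]
        have htake := take_lenTakeWhile PySem.Chars.isdigit (full.drop (i + 1))
        have hdropn := drop_lenTakeWhile PySem.Chars.isdigit (full.drop (i + 1))
        have hjle : innerA full (i + 1) ≤ full.length := innerA_le full (i + 1) hilt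
        rw [hruns, scanB]
        simp only [List.headD_cons, hdig, List.length_cons, true_and]
        by_cases hq : w1 ≤ ((((full.drop (i + 1)).takeWhile PySem.Chars.isdigit).length : Nat) + 1 : Int)
            ∧ ((((full.drop (i + 1)).takeWhile PySem.Chars.isdigit).length : Nat) + 1 : Int) ≤ w2
        · rw [if_pos (by push_cast; push_cast at hq; omega), if_pos (by push_cast; push_cast at hq; omega)]
          rw [hj]
          congr 1
          simp only [PySem.List.slice_zero_start]
          congr 1
          · congr 1
            rw [PySem.List.slice_natCast,
              show i + 1 + ((full.drop (i + 1)).takeWhile PySem.Chars.isdigit).length - i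
                  = ((full.drop (i + 1)).takeWhile PySem.Chars.isdigit).length + 1 from by omega,
              hd, List.take_succ_cons, htake]
          · rw [PySem.List.slice_natCast,
              List.take_of_length_le (by simp [List.length_drop]),
              show ((i : Int) + (((full.drop (i + 1)).takeWhile PySem.Chars.isdigit).length + 1 : Nat))
                  = (((i + (((full.drop (i + 1)).takeWhile PySem.Chars.isdigit).length + 1)) : Nat) : Int)
                from by push_cast; ring,
              PySem.List.slice_from_natCast,
              show i + (((full.drop (i + 1)).takeWhile PySem.Chars.isdigit).length + 1)
                  = i + 1 + ((full.drop (i + 1)).takeWhile PySem.Chars.isdigit).length from by omega]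
        · rw [if_neg (by push_cast; push_cast at hq; omega), if_neg (by push_cast; push_cast at hq; omega)]
          have hQ' : 1 ≤ w1 ∨ ∃ r ∈ pvRuns (full.drop (innerA full (i + 1))),
              r.all PySem.Chars.isdigit = true ∧ (r.length : Int) ≤ w2 := by
            rcases hQ with h | ⟨r, hr, hp⟩
            · exact Or.inl h
            · by_cases hw : 1 ≤ w1
              · exact Or.inl hw
              · right
                rw [hruns] at hr
                rcases List.mem_cons.mp hr with he | hmem
                · exfalso
                  have : (r.length : Int) ≤ w2 := hp.2
                  rw [he] at this
                  simp at this
                  push_cast at hq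
                  omega
                · refine ⟨r, ?_, hp⟩
                  rw [hj, ← List.drop_drop, hdropn]
                  exact hmem
          rw [mainA full w1 w2 (innerA full (i + 1)) hjle hQ']
          congr 2
          · rw [hj, ← List.drop_drop, hdropn]
          · rw [hj]
            omega
      · -- non-digit at i: step one char
        rw [if_neg hdig]
        have hdf : PySem.Chars.isdigit c = false := by simpa using hdig
        have hQ' : 1 ≤ w1 ∨ ∃ r ∈ pvRuns (full.drop (i + 1)),
            r.all PySem.Chars.isdigit = true ∧ (r.length : Int) ≤ w2 := by
          rcases hQ with h | ⟨r, hr, hp⟩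
          · exact Or.inl h
          · right
            rw [hd, pvRuns_cons] at hr
            rcases List.mem_cons.mp hr with he | hmem
            · exfalso
              have hall := hp.1
              rw [he] at hall
              simp [List.all_cons] at hall
              rw [hall.1] at hdf
              cases hdf
            · exact ⟨r, pvRuns_dropWhile_sub _ _ _ hmem, hp⟩
        rw [mainA full w1 w2 (i + 1) hilt hQ']
        congr 1
        conv_rhs => rw [hd, pvRuns_cons]
        rw [scanB, if_neg (by simp [hdf])]
        rw [List.length_cons,
          show i + ((((full.drop (i + 1)).takeWhile
              (fun x => PySem.Chars.isdigit x == PySem.Chars.isdigit c)).length) + 1)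
              = (i + 1) + ((full.drop (i + 1)).takeWhile
              (fun x => PySem.Chars.isdigit x == PySem.Chars.isdigit c)).length
            from by omega]
        exact (scanB_skip full w1 w2 (full.drop (i + 1)) c (i + 1) hdf).symm
  · -- loop bound exhausted: A returns s1, and no run can qualify
    rename_i hcond
    have hfull : scanB full w1 w2 (pvRuns (full.drop i)) i = full := by
      apply scanB_eq_full
      intro r hr
      rintro ⟨-, h1, h2⟩
      have hs := pvRuns_sound _ r hr
      have hlen : r.length ≤ full.length - i := by
        have := hs.2.1
        simpa [List.length_drop] using this
      omega
    rw [hfull]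
termination_by full.length - i

-- ===== VERDICT (by name: the statement is the Claim_ definition above) =====
theorem insertZero_spec : Claim_equal_insertZero := by
  intro s1 w1 w2 _ hpre
  unfold Spec_insertZero insertZero insertZero_alt
  unfold Pre_insertZero at hpre
  have hQ : 1 ≤ w1 ∨ ∃ r ∈ pvRuns (s1.toList.drop 0),
      r.all PySem.Chars.isdigit = true ∧ (r.length : Int) ≤ w2 := by
    rw [List.drop_zero]
    exact hpre
  rw [mainA s1.toList w1 w2 0 (Nat.zero_le _) hQ, List.drop_zero, buildRuns_eq]
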